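-- pv_equiv track=rewrite | github.com/Jawakaspa/kitviewsearchv53 | fr2tags.py | extraire_termes_individuels
-- ===== SOURCE A (Python) =====
-- def extraire_termes_individuels(liste_csv):
--     """
--     Extrait tous les termes individuels d'une liste CSV.
--
--     Format d'entrée : "terme1,terme2|terme3,terme4"
--     Sortie : ['terme1', 'terme2', 'terme3', 'terme4']
--     """
--     if not liste_csv or liste_csv.strip() == "":
--         return []
--
--     termes = []
--     for groupe in liste_csv.split(","):
--         groupe = groupe.strip()
--         if "|" in groupe:
--             for sous_terme in groupe.split("|"):
--                 sous_terme = sous_terme.strip()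
--                 if sous_terme:
--                     termes.append(sous_terme)
--         elif groupe:
--             termes.append(groupe)
--
--     return termes
-- ===== SOURCE B (Python) =====
-- def extraire_termes_individuels(liste_csv):
--     """
--     Extrait tous les termes individuels d'une liste CSV.
--
--     Les deux separateurs ',' et '|' sont unifies d'abord, puis la chaine est
--     decoupee en une seule passe a plat (pas de branche imbriquee par groupe).
--     """
--     if not liste_csv:
--         return []
--     jetons = [tok.strip() for tok in liste_csv.replace("|", ",").split(",")]
--     return [t for t in jetons if t]
-- ===== Notes on version B (the rewrite author's own statement) =====
-- stated objective: simpler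
-- what changed: Replaces the nested split-on-comma with a per-group pipe-membership branch and inner pipe split by a single flat tokenization: rewrite the pipe separator into the comma separator once, split once, strip each token and drop empty ones.
import Mathlib
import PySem

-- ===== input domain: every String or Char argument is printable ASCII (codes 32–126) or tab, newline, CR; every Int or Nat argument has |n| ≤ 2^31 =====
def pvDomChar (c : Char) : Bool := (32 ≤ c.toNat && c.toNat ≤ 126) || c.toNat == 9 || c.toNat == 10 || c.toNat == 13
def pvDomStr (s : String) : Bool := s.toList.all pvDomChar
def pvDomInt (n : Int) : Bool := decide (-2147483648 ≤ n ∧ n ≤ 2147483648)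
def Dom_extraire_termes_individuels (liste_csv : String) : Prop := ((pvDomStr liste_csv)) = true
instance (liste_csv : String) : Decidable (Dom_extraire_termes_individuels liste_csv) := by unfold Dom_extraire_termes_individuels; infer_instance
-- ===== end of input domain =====

-- B replaces A's nested split-on-comma + per-group pipe branch by one flat tokenization
-- (rewrite the pipe separator into the comma separator, split once, strip, drop empties); objective: simpler.

-- ===== PORT A =====
def extraire_termes_individuels (liste_csv : String) : List String :=
  if liste_csv = "" || PySem.Str.strip liste_csv = "" then []
  else
    -- `s.split(",")` with a nonempty literal separator: split? is always `some`, getD [] is a totality guard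
    ((PySem.Str.split? liste_csv ",").getD []).foldl (fun termes groupe =>
      let groupe := PySem.Str.strip groupe
      if PySem.Str.isIn "|" groupe then
        ((PySem.Str.split? groupe "|").getD []).foldl (fun termes sous_terme =>
          let sous_terme := PySem.Str.strip sous_terme
          if sous_terme ≠ "" then termes ++ [sous_terme] else termes) termes
      else if groupe ≠ "" then termes ++ [groupe] else termes) []

-- ===== PORT B =====
def extraire_termes_individuels_alt (liste_csv : String) : List String :=
  if liste_csv = "" then []
  else
    let jetons := ((PySem.Str.split? (PySem.Str.replace liste_csv "|" ",") ",").getD []).map PySem.Str.strip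
    jetons.filter (fun t => t ≠ "")

-- ===== PRECONDITION & SPEC =====
def Spec_extraire_termes_individuels (liste_csv : String) (out : List String) : Prop := out = extraire_termes_individuels_alt liste_csv
instance (liste_csv : String) (out : List String) : Decidable (Spec_extraire_termes_individuels liste_csv out) := by unfold Spec_extraire_termes_individuels; infer_instance

-- ===== CLAIM (what is proved, stated in full; the proofs are below) =====
def Claim_equal_extraire_termes_individuels : Prop := ∀ (liste_csv : String), Dom_extraire_termes_individuels liste_csv → Spec_extraire_termes_individuels liste_csv (extraire_termes_individuels liste_csv)

-- ===== LEMMAS AND PROOFS =====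

-- Char-level model pieces
def pvRp (x : Char) : Char := if x == '|' then ',' else x

def pvClean (l : List (List Char)) : List (List Char) :=
  (l.map PySem.Chars.strip).filter (fun h => h ≠ [])

theorem pvClean_cons (h : List Char) (t : List (List Char)) :
    pvClean (h :: t) = (if PySem.Chars.strip h ≠ [] then [PySem.Chars.strip h] else []) ++ pvClean t := by
  simp only [pvClean, List.map_cons, List.filter_cons]
  split_ifs with h1 h2 h3 <;> simp_all

theorem pvClean_append (u v : List (List Char)) : pvClean (u ++ v) = pvClean u ++ pvClean v := by
  simp [pvClean]

theorem pvClean_flatMap (f : List Char → List (List Char)) (u : List (List Char)) :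
    pvClean (u.flatMap f) = u.flatMap (fun g => pvClean (f g)) := by
  induction u with
  | nil => rfl
  | cons g t ih => simp [List.flatMap_cons, pvClean_append, ih]

theorem pv_ofList_ne_empty (x : List Char) : (String.ofList x ≠ "") ↔ x ≠ [] := by
  constructor
  · intro h hc; exact h (by rw [hc])
  · intro h hc
    have h2 := congrArg String.toList hc
    rw [String.toList_ofList] at h2
    exact h h2

-- fuel-based splitOn on a single-char separator is List.splitOn
theorem pv_modifyHead_id {α : Type} (L : List α) : List.modifyHead (fun h => h) L = L := by
  cases L <;> rfl

theorem pv_go_split (c : Char) : ∀ (fuel : Nat) (l cur : List Char) (acc : List (List Char)),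
    l.length < fuel →
    PySem.Chars.splitOn.go [c] fuel l cur acc
      = acc.reverse ++ (List.splitOn c l).modifyHead (fun h => cur.reverse ++ h) := by
  intro fuel
  induction fuel with
  | zero => intro l cur acc h; omega
  | succ n ih =>
    intro l cur acc h
    cases l with
    | nil =>
      simp [PySem.Chars.splitOn.go, List.splitOn_nil]
    | cons a rest =>
      by_cases hc : a = c
      · subst hc
        have hp : [a].isPrefixOf (a :: rest) = true := by simp [List.isPrefixOf]
        rw [PySem.Chars.splitOn.go]
        simp only [hp, if_true, List.length_cons, List.length_nil, List.drop_succ_cons,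
          List.drop_zero] at *
        rw [ih rest [] (cur.reverse :: acc) (by omega)]
        simp only [List.splitOn, List.splitOnP_cons, beq_self_eq_true, if_true]
        cases List.splitOnP (fun x => x == a) rest <;> simp
      · have hp : [c].isPrefixOf (a :: rest) = false := by
          simp [List.isPrefixOf]; exact fun hh => absurd hh.symm hc
        rw [PySem.Chars.splitOn.go]
        simp only [hp, Bool.false_eq_true, if_false]
        rw [ih rest (a :: cur) acc (by simpa using Nat.lt_of_succ_lt_succ h)]
        have hne := List.splitOnP_ne_nil (fun x => x == c) rest
        obtain ⟨hh, tt, he⟩ := List.exists_cons_of_ne_nil hne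
        simp [List.splitOn, List.splitOnP_cons, hc, he]

theorem pv_splitOn_single (l : List Char) (c : Char) :
    PySem.Chars.splitOn l [c] = List.splitOn c l := by
  have := pv_go_split c (l.length + 1) l [] [] (by omega)
  rw [PySem.Chars.splitOn, this]
  cases List.splitOn c l <;> simp

-- fuel-based replace on single chars is a map
theorem pv_go_replace (a b : Char) : ∀ (fuel : Nat) (l acc : List Char),
    l.length ≤ fuel →
    PySem.Chars.replace.go [a] [b] fuel l acc
      = acc.reverse ++ l.map (fun x => if x == a then b else x) := by
  intro fuel
  induction fuel with
  | zero =>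
    intro l acc h
    have : l = [] := List.length_eq_zero_iff.mp (Nat.le_zero.mp h)
    subst this; simp [PySem.Chars.replace.go]
  | succ n ih =>
    intro l acc h
    cases l with
    | nil => simp [PySem.Chars.replace.go]
    | cons x rest =>
      by_cases hx : x = a
      · subst hx
        have hp : [x].isPrefixOf (x :: rest) = true := by simp [List.isPrefixOf]
        rw [PySem.Chars.replace.go]
        simp only [hp, if_true, List.length_cons, List.length_nil, List.drop_succ_cons,
          List.drop_zero] at *
        rw [ih rest ([b].reverse ++ acc) (by omega)]
        simp
      · have hp : [a].isPrefixOf (x :: rest) = false := by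
          simp [List.isPrefixOf]; exact fun hh => absurd hh.symm hx
        rw [PySem.Chars.replace.go]
        simp only [hp, Bool.false_eq_true, if_false]
        rw [ih rest (x :: acc) (by simpa using Nat.le_of_succ_le_succ h)]
        simp [hx]

theorem pv_replace_single (l : List Char) (a b : Char) :
    PySem.Chars.replace l [a] [b] = l.map (fun x => if x == a then b else x) := by
  have := pv_go_replace a b l.length l [] (by omega)
  simpa [PySem.Chars.replace] using this

-- strip facts
theorem pv_strip_cons_space {a : Char} (x : List Char) (ha : PySem.Chars.isspace a = true) :
    PySem.Chars.strip (a :: x) = PySem.Chars.strip x := by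
  simp [PySem.Chars.strip, PySem.Chars.lstrip, ha]

theorem pv_rstrip_snoc_space {a : Char} (x : List Char) (ha : PySem.Chars.isspace a = true) :
    PySem.Chars.rstrip (x ++ [a]) = PySem.Chars.rstrip x := by
  simp [PySem.Chars.rstrip, ha]

theorem pv_strip_snoc_space {a : Char} (x : List Char) (ha : PySem.Chars.isspace a = true) :
    PySem.Chars.strip (x ++ [a]) = PySem.Chars.strip x := by
  simp only [PySem.Chars.strip, PySem.Chars.lstrip]
  rcases hd : List.dropWhile PySem.Chars.isspace x with _ | ⟨b, t⟩
  · have : List.dropWhile PySem.Chars.isspace (x ++ [a]) = [] := by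
      rw [List.dropWhile_eq_nil_iff] at hd ⊢
      intro y hy
      rcases List.mem_append.mp hy with h | h
      · exact hd y h
      · simp at h; subst h; exact ha
    simp [this]
  · have : List.dropWhile PySem.Chars.isspace (x ++ [a]) = (b :: t) ++ [a] := by
      rw [List.dropWhile_append, hd]; simp
    rw [this]
    have h2 := pv_rstrip_snoc_space (b :: t) ha
    simpa using h2

theorem pv_strip_eq_nil_allspace {l : List Char} (h : PySem.Chars.strip l = []) :
    ∀ c ∈ l, PySem.Chars.isspace c = true := by
  intro c hc
  simp only [PySem.Chars.strip, PySem.Chars.rstrip, PySem.Chars.lstrip] at h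
  have h1 : List.dropWhile PySem.Chars.isspace (List.dropWhile PySem.Chars.isspace l).reverse = [] := by
    simpa using congrArg List.reverse h
  rw [List.dropWhile_eq_nil_iff] at h1
  rcases List.mem_append.mp (by rw [List.takeWhile_append_dropWhile (p := PySem.Chars.isspace)]; exact hc) with hm | hm
  · exact List.mem_takeWhile_imp hm
  · exact h1 c (List.mem_reverse.mpr hm)

theorem pv_mem_dropWhile {p : Char → Bool} {c : Char} {l : List Char}
    (hc : p c = false) (h : c ∈ l) : c ∈ List.dropWhile p l := by
  rcases List.mem_append.mp (by rw [List.takeWhile_append_dropWhile (p := p)]; exact h) with hm | hm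
  · have := List.mem_takeWhile_imp hm; rw [this] at hc; cases hc
  · exact hm

theorem pv_mem_strip {c : Char} (x : List Char) (hc : PySem.Chars.isspace c = false) :
    c ∈ PySem.Chars.strip x ↔ c ∈ x := by
  constructor
  · intro h
    have h1 : List.Sublist (PySem.Chars.strip x) x := by
      simp only [PySem.Chars.strip, PySem.Chars.rstrip, PySem.Chars.lstrip]
      have hs1 : List.Sublist
          ((List.dropWhile PySem.Chars.isspace (List.dropWhile PySem.Chars.isspace x).reverse).reverse)
          (((List.dropWhile PySem.Chars.isspace x).reverse).reverse) :=
        (List.dropWhile_sublist _).reverse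
      have hs2 : List.Sublist (((List.dropWhile PySem.Chars.isspace x).reverse).reverse) x := by
        simpa using List.dropWhile_sublist (p := PySem.Chars.isspace) (l := x)
      exact hs1.trans hs2
    exact h1.mem h
  · intro h
    simp only [PySem.Chars.strip, PySem.Chars.rstrip, PySem.Chars.lstrip, List.mem_reverse]
    exact pv_mem_dropWhile hc (List.mem_reverse.mpr (pv_mem_dropWhile hc h))

theorem pv_splitOn_not_mem {c : Char} {x : List Char} (h : c ∉ x) : List.splitOn c x = [x] := by
  apply List.splitOnP_eq_single
  intro y hy
  simp only [beq_iff_eq]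
  intro he; subst he; exact h hy

-- clean ∘ splitOn is invariant under stripping (separator is not whitespace)
theorem pv_clean_lstrip {c : Char} (hc : PySem.Chars.isspace c = false) (x : List Char) :
    pvClean (List.splitOn c (PySem.Chars.lstrip x)) = pvClean (List.splitOn c x) := by
  induction x with
  | nil => simp [PySem.Chars.lstrip]
  | cons a t ih =>
    by_cases ha : PySem.Chars.isspace a = true
    · have hl : PySem.Chars.lstrip (a :: t) = PySem.Chars.lstrip t := by
        simp [PySem.Chars.lstrip, ha]
      have hac : (a == c) = false := by
        simp only [beq_eq_false_iff_ne]; intro he; subst he; rw [ha] at hc; cases hc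
      obtain ⟨hh, tt, he⟩ := List.exists_cons_of_ne_nil (List.splitOnP_ne_nil (fun x => x == c) t)
      rw [hl, ih]
      simp only [List.splitOn, List.splitOnP_cons, hac, Bool.false_eq_true, if_false, he,
        List.modifyHead_cons, pvClean_cons, pv_strip_cons_space _ ha]
    · simp [PySem.Chars.lstrip, ha]

theorem pv_clean_snoc_space {c a : Char} (hc : PySem.Chars.isspace c = false)
    (ha : PySem.Chars.isspace a = true) :
    ∀ (x pre : List Char),
      pvClean ((List.splitOn c (x ++ [a])).modifyHead (fun h => pre ++ h))
        = pvClean ((List.splitOn c x).modifyHead (fun h => pre ++ h)) := by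
  intro x
  induction x with
  | nil =>
    intro pre
    have hac : (a == c) = false := by
      simp only [beq_eq_false_iff_ne]; intro he; subst he; rw [ha] at hc; cases hc
    simp [List.splitOn, List.splitOnP_cons, hac, List.splitOnP_nil, pvClean_cons,
      pv_strip_snoc_space _ ha]
  | cons b t ih =>
    intro pre
    by_cases hb : b = c
    · subst hb
      have h1 := ih []
      simp only [List.nil_append, pv_modifyHead_id] at h1
      simp only [List.splitOn, List.cons_append, List.splitOnP_cons, beq_self_eq_true, if_true,
        List.modifyHead_cons, pvClean_cons] at h1 ⊢
      rw [h1]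
    · have hbc : (b == c) = false := by simpa using hb
      have h1 := ih (pre ++ [b])
      simp only [List.splitOn, List.cons_append, List.splitOnP_cons, hbc, Bool.false_eq_true,
        if_false, List.modifyHead_modifyHead] at *
      have hcomp : ((fun h => pre ++ h) ∘ List.cons b) = fun h => (pre ++ [b]) ++ h := by
        funext h; simp
      rw [hcomp] at *
      exact h1

theorem pv_clean_rstrip {c : Char} (hc : PySem.Chars.isspace c = false) (x : List Char) :
    pvClean (List.splitOn c (PySem.Chars.rstrip x)) = pvClean (List.splitOn c x) := by
  induction x using List.reverseRecOn with
  | nil => simp [PySem.Chars.rstrip]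
  | append_singleton t a ih =>
    by_cases ha : PySem.Chars.isspace a = true
    · have h2 := pv_clean_snoc_space hc ha t []
      simp only [List.nil_append, pv_modifyHead_id] at h2
      rw [pv_rstrip_snoc_space _ ha, ih, h2]
    · have : PySem.Chars.rstrip (t ++ [a]) = t ++ [a] := by
        simp [PySem.Chars.rstrip, ha]
      rw [this]

theorem pv_clean_strip {c : Char} (hc : PySem.Chars.isspace c = false) (x : List Char) :
    pvClean (List.splitOn c (PySem.Chars.strip x)) = pvClean (List.splitOn c x) := by
  rw [PySem.Chars.strip, pv_clean_rstrip hc, pv_clean_lstrip hc]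

-- an all-whitespace string yields no tokens
theorem pv_clean_allspace {c : Char} (hc : PySem.Chars.isspace c = false) :
    ∀ {l : List Char}, (∀ x ∈ l, PySem.Chars.isspace x = true) →
      pvClean (List.splitOn c l) = [] := by
  intro l
  induction l with
  | nil => intro _; simp [List.splitOn, List.splitOnP_nil, PySem.Chars.strip,
      PySem.Chars.lstrip, PySem.Chars.rstrip, pvClean]
  | cons a t ih =>
    intro h
    have ha : PySem.Chars.isspace a = true := h a (by simp)
    have hac : (a == c) = false := by
      simp only [beq_eq_false_iff_ne]; intro he; subst he; rw [ha] at hc; cases hc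
    obtain ⟨hh, tt, he⟩ := List.exists_cons_of_ne_nil (List.splitOnP_ne_nil (fun x => x == c) t)
    have := ih (fun x hx => h x (by simp [hx]))
    rw [List.splitOn] at this ⊢
    simp only [List.splitOnP_cons, hac, Bool.false_eq_true, if_false, he, List.modifyHead_cons,
      pvClean_cons, pv_strip_cons_space _ ha] at this ⊢
    exact this

-- splitting the '|'→',' image on ',' = splitting on ',' then each group on '|'
theorem pv_splitOn_cons (c a : Char) (l : List Char) :
    List.splitOn c (a :: l)
      = if a == c then [] :: List.splitOn c l
        else (List.splitOn c l).modifyHead (List.cons a) := by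
  simp [List.splitOn, List.splitOnP_cons]

theorem pv_splitOn_map_rp (l : List Char) :
    List.splitOn ',' (l.map pvRp) = (List.splitOn ',' l).flatMap (List.splitOn '|') := by
  induction l with
  | nil => simp [List.splitOn_nil]
  | cons a t ih =>
    have hne : List.splitOn ',' t ≠ [] := List.splitOnP_ne_nil (fun x => x == ',') t
    obtain ⟨hh, tt, he⟩ := List.exists_cons_of_ne_nil hne
    by_cases h1 : a = ','
    · subst h1
      rw [List.map_cons, show pvRp ',' = ',' from rfl, pv_splitOn_cons, pv_splitOn_cons]
      simp only [beq_self_eq_true, if_true, ih, List.flatMap_cons, List.splitOn_nil]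
      simp
    · by_cases h2 : a = '|'
      · subst h2
        rw [List.map_cons, show pvRp '|' = ',' from rfl, pv_splitOn_cons, pv_splitOn_cons]
        simp only [beq_self_eq_true, if_true, show (('|' : Char) == ',') = false from rfl,
          Bool.false_eq_true, if_false, ih, he, List.modifyHead_cons, List.flatMap_cons,
          pv_splitOn_cons]
        simp
      · have ha1 : (a == ',') = false := by simpa using h1
        have ha2 : (a == '|') = false := by simpa using h2
        have hg' : List.splitOn '|' hh ≠ [] := List.splitOnP_ne_nil (fun x => x == '|') hh
        obtain ⟨gg, uu, hg⟩ := List.exists_cons_of_ne_nil hg'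
        rw [List.map_cons, show pvRp a = a from by simp [pvRp, ha2], pv_splitOn_cons,
          pv_splitOn_cons, ha1]
        simp only [Bool.false_eq_true, if_false, ih, he, List.modifyHead_cons,
          List.flatMap_cons, hg, pv_splitOn_cons, ha2]
        simp

theorem pv_strip_ofList (p : List Char) :
    PySem.Str.strip (String.ofList p) = String.ofList (PySem.Chars.strip p) := by
  simp [PySem.Str.strip]

-- the inner loop of A appends the cleaned pieces
theorem pv_inner_fold (parts : List (List Char)) : ∀ (ts : List String),
    (parts.map String.ofList).foldl (fun termes st =>
        let st := PySem.Str.strip st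
        if st ≠ "" then termes ++ [st] else termes) ts
      = ts ++ (pvClean parts).map String.ofList := by
  induction parts with
  | nil => intro ts; simp [pvClean]
  | cons p t ih =>
    intro ts
    simp only [List.map_cons, List.foldl_cons, pv_strip_ofList, pvClean_cons]
    by_cases hp : PySem.Chars.strip p ≠ []
    · rw [if_pos ((pv_ofList_ne_empty _).mpr hp), ih, if_pos hp]; simp
    · rw [if_neg (fun hc => hp ((pv_ofList_ne_empty _).mp hc)), ih, if_neg hp]; simp

-- the outer loop of A builds the per-group cleaned pieces, flattened
theorem pv_outer_fold (groups : List (List Char)) : ∀ (ts : List String),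
    (groups.map String.ofList).foldl (fun termes groupe =>
        let groupe := PySem.Str.strip groupe
        if PySem.Str.isIn "|" groupe then
          ((PySem.Str.split? groupe "|").getD []).foldl (fun termes sous_terme =>
            let sous_terme := PySem.Str.strip sous_terme
            if sous_terme ≠ "" then termes ++ [sous_terme] else termes) termes
        else if groupe ≠ "" then termes ++ [groupe] else termes) ts
      = ts ++ (groups.flatMap (fun g => pvClean (List.splitOn '|' g))).map String.ofList := by
  induction groups with
  | nil => intro ts; simp
  | cons g t ih =>
    intro ts
    have hisin : PySem.Str.isIn "|" (String.ofList (PySem.Chars.strip g))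
        = PySem.Chars.isIn ['|'] (PySem.Chars.strip g) := by
      simp [PySem.Str.isIn]
    have hmem : PySem.Chars.isIn ['|'] (PySem.Chars.strip g) = true ↔ '|' ∈ PySem.Chars.strip g := by
      rw [PySem.Chars.isIn_iff_infix]
      constructor
      · intro h; exact h.sublist.mem (by simp)
      · intro h
        obtain ⟨s1, s2, he⟩ := List.append_of_mem h
        exact ⟨s1, s2, by simp [he]⟩
    simp only [List.map_cons, List.foldl_cons, pv_strip_ofList, hisin, List.flatMap_cons]
    by_cases hin : '|' ∈ PySem.Chars.strip g
    · rw [if_pos (hmem.mpr hin)]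
      have hsplit : PySem.Str.split? (String.ofList (PySem.Chars.strip g)) "|"
          = some (((List.splitOn '|' (PySem.Chars.strip g))).map String.ofList) := by
        simp [PySem.Str.split?, PySem.Chars.split?, pv_splitOn_single,
          show ("|" : String).toList = ['|'] from rfl]
      rw [hsplit]
      simp only [Option.getD_some]
      rw [pv_inner_fold, ih, pv_clean_strip (c := '|') rfl]
      simp
    · rw [if_neg (fun hc => hin (hmem.mp hc))]
      have hnotg : '|' ∉ g := fun hc => hin ((pv_mem_strip g rfl).mpr hc)
      rw [pv_splitOn_not_mem hnotg]
      by_cases hp : PySem.Chars.strip g ≠ []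
      · rw [if_pos ((pv_ofList_ne_empty _).mpr hp), ih]
        simp [hp, pvClean]
      · rw [if_neg (fun hc => hp ((pv_ofList_ne_empty _).mp hc)), ih]
        simp [hp, pvClean]

-- A as a char-level model (unconditionally)
theorem pv_portA_eq (s : String) :
    extraire_termes_individuels s
      = ((List.splitOn ',' s.toList).flatMap (fun g => pvClean (List.splitOn '|' g))).map String.ofList := by
  unfold extraire_termes_individuels
  by_cases h1 : s = ""
  · subst h1
    simp [List.splitOn, List.splitOnP_nil, pvClean, PySem.Chars.strip, PySem.Chars.lstrip,
      PySem.Chars.rstrip]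
  · by_cases h2 : PySem.Str.strip s = ""
    · rw [if_pos (by simp [h1, h2])]
      have hall : ∀ x ∈ s.toList, PySem.Chars.isspace x = true := by
        apply pv_strip_eq_nil_allspace
        have := congrArg String.toList h2
        simpa [PySem.Str.strip] using this
      rw [← pvClean_flatMap, ← pv_splitOn_map_rp]
      rw [pv_clean_allspace (c := ',') rfl]
      · rfl
      · intro x hx
        obtain ⟨y, hy, he⟩ := List.mem_map.mp hx
        have hsy := hall y hy
        have : pvRp y = y := by
          simp only [pvRp, beq_eq_false_iff_ne.mpr (fun hc : y = '|' => by
            subst hc; cases hsy), Bool.false_eq_true, if_false]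
        rw [← he, this]; exact hsy
    · rw [if_neg (by simp [h1, h2])]
      have hsplit : PySem.Str.split? s ","
          = some ((List.splitOn ',' s.toList).map String.ofList) := by
        simp [PySem.Str.split?, PySem.Chars.split?, pv_splitOn_single,
          show ("," : String).toList = [','] from rfl]
      rw [hsplit]
      simp only [Option.getD_some]
      rw [pv_outer_fold]
      simp

-- B as a char-level model (unconditionally)
theorem pv_portB_eq (s : String) :
    extraire_termes_individuels_alt s
      = (pvClean (List.splitOn ',' (s.toList.map pvRp))).map String.ofList := by
  unfold extraire_termes_individuels_alt
  by_cases h1 : s = ""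
  · subst h1
    simp [List.splitOn, List.splitOnP_nil, pvClean, PySem.Chars.strip, PySem.Chars.lstrip,
      PySem.Chars.rstrip]
  · rw [if_neg h1]
    have hrep : PySem.Str.replace s "|" "," = String.ofList (s.toList.map pvRp) := by
      simp only [PySem.Str.replace, show ("|" : String).toList = ['|'] from rfl,
        show ("," : String).toList = [','] from rfl, pv_replace_single]
      rfl
    rw [hrep]
    have hsplit : PySem.Str.split? (String.ofList (s.toList.map pvRp)) ","
        = some ((List.splitOn ',' (s.toList.map pvRp)).map String.ofList) := by
      simp [PySem.Str.split?, PySem.Chars.split?, pv_splitOn_single,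
        show ("," : String).toList = [','] from rfl]
    rw [hsplit]
    simp only [Option.getD_some, List.map_map]
    have hmap : (PySem.Str.strip ∘ String.ofList) = (String.ofList ∘ PySem.Chars.strip) := by
      funext p; exact pv_strip_ofList p
    rw [hmap, ← List.map_map, List.filter_map]
    have hpred : ((fun t => decide (t ≠ "")) ∘ String.ofList)
        = fun x : List Char => decide (x ≠ []) := by
      funext x
      simp only [Function.comp_apply, decide_eq_decide]
      exact pv_ofList_ne_empty x
    simp only [pvClean, hpred]

-- ===== VERDICT (by name: the statement is the Claim_ definition above) =====
theorem extraire_termes_individuels_spec : Claim_equal_extraire_termes_individuels := by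
  intro s _
  unfold Spec_extraire_termes_individuels
  rw [pv_portA_eq, pv_portB_eq, pv_splitOn_map_rp, pvClean_flatMap]
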